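-- pv_equiv track=rewrite | github.com/JS0832/Group_project | mysite/websiteApp/libraries/websiteApp/codebase.py | stringComparison
-- ===== SOURCE A (Python) =====
-- def stringComparison(stringA: str, stringB: str) -> bool:
--     """Compares two strings, removing some character, returns True if the same
--
--     Keyword Arguments:
--     stringA : str
--     stringB : str
--     """
--     characterToRemove = [" ", "-", ",", "."]
--         #Any character that may cause discrepancies between correct inputs.
--
--     for character in characterToRemove:
--         # Remove the unnecessary characters by replacing them with nothing
--         stringA = stringA.replace(character, '')
--         stringB = stringB.replace(character, '')
--
--     if stringA.lower() == stringB.lower():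
--         return True
--     else:
--         return False
-- ===== SOURCE B (Python) =====
-- def stringComparison(stringA: str, stringB: str) -> bool:
--     """Compares two strings, removing some characters, returns True if the same."""
--     removal = {" ", "-", ",", "."}
--     filtered_a = ''.join(c for c in stringA if c not in removal)
--     filtered_b = ''.join(c for c in stringB if c not in removal)
--     return filtered_a.lower() == filtered_b.lower()
-- ===== Notes on version B (the rewrite author's own statement) =====
-- stated objective: simpler
-- what changed: Replaces A's four whole-string replace passes (one per removal character) with a single filtering pass over each string's characters against a removal set, then one lowercase comparison.
import Mathlib
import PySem

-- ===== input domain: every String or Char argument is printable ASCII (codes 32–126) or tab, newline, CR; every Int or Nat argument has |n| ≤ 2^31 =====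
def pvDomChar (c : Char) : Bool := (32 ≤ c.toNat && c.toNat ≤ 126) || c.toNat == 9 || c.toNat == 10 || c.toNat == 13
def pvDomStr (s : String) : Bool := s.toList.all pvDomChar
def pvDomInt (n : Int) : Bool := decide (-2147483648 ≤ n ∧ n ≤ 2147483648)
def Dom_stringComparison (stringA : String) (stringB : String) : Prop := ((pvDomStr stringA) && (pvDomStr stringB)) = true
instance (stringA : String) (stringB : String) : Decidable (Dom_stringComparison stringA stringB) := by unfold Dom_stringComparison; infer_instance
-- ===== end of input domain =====

-- B replaces A's four whole-string replace passes with one filtering pass per string (objective: simpler).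

-- ===== PORT A =====
-- for character in characterToRemove: stringA = stringA.replace(character, ''); stringB = …
def stringComparison (stringA : String) (stringB : String) : Bool :=
  let characterToRemove : List String := [" ", "-", ",", "."]
  let st := characterToRemove.foldl
    (fun (p : String × String) character =>
      (PySem.Str.replace p.1 character "", PySem.Str.replace p.2 character ""))
    (stringA, stringB)
  if PySem.Str.lower st.1 == PySem.Str.lower st.2 then true else false

-- ===== PORT B =====
-- ''.join(c for c in s if c not in removal), then compare lowercased results
def pvFilterKeep (s : String) : List Char :=
  let removal : List Char := [' ', '-', ',', '.']
  s.toList.filter (fun c => !(removal.contains c))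

def stringComparison_alt (stringA : String) (stringB : String) : Bool :=
  PySem.Chars.lower (pvFilterKeep stringA) == PySem.Chars.lower (pvFilterKeep stringB)

-- ===== PRECONDITION & SPEC =====
def Spec_stringComparison (stringA : String) (stringB : String) (out : Bool) : Prop := out = stringComparison_alt stringA stringB
instance (stringA : String) (stringB : String) (out : Bool) : Decidable (Spec_stringComparison stringA stringB out) := by unfold Spec_stringComparison; infer_instance

-- ===== CLAIM (what is proved, stated in full; the proofs are below) =====
def Claim_equal_stringComparison : Prop := ∀ (stringA : String) (stringB : String), Dom_stringComparison stringA stringB → Spec_stringComparison stringA stringB (stringComparison stringA stringB)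

-- ===== LEMMAS AND PROOFS =====

-- replace.go with a one-character pattern and empty replacement filters that character
theorem pv_go_single (r : Char) : ∀ (l : List Char) (fuel : Nat) (acc : List Char),
    l.length ≤ fuel →
    PySem.Chars.replace.go [r] [] fuel l acc = acc.reverse ++ l.filter (fun c => !(c == r)) := by
  intro l
  induction l with
  | nil =>
    intro fuel acc _
    cases fuel <;> simp [PySem.Chars.replace.go]
  | cons c t ih =>
    intro fuel acc h
    cases fuel with
    | zero => simp at h
    | succ fuel =>
      by_cases hc : c = r
      · subst hc
        have hpre : List.isPrefixOf [c] (c :: t) = true := by simp [List.isPrefixOf]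
        rw [PySem.Chars.replace.go]
        simp only [hpre, if_true]
        rw [show List.drop (List.length [c]) (c :: t) = t from rfl,
            show ([] : List Char).reverse ++ acc = acc from rfl]
        rw [ih fuel acc (by simpa using Nat.le_of_succ_le_succ h)]
        simp
      · have hpre : List.isPrefixOf [r] (c :: t) = false := by
          simp [List.isPrefixOf]
          exact fun hrc => absurd hrc.symm hc
        rw [PySem.Chars.replace.go]
        simp only [hpre]
        rw [if_neg (by simp [hpre])]
        rw [ih fuel (c :: acc) (by simpa using Nat.le_of_succ_le_succ h)]
        simp [hc]

theorem pv_replace_single (r : Char) (cs : List Char) :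
    PySem.Chars.replace cs [r] [] = cs.filter (fun c => !(c == r)) := by
  rw [PySem.Chars.replace, if_neg (by simp)]
  exact pv_go_single r cs cs.length [] (le_refl _)

theorem pv_four_replaces (cs : List Char) :
    PySem.Chars.replace (PySem.Chars.replace (PySem.Chars.replace
      (PySem.Chars.replace cs [' '] []) ['-'] []) [','] []) ['.'] []
    = cs.filter (fun c => !([' ', '-', ',', '.'].contains c)) := by
  rw [pv_replace_single, pv_replace_single, pv_replace_single, pv_replace_single]
  simp only [List.filter_filter]
  apply List.filter_congr
  intro c _
  simp only [List.contains_cons, List.contains_nil, Bool.or_false, Bool.not_or]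
  cases c == ' ' <;> cases c == '-' <;> cases c == ',' <;> cases c == '.' <;> rfl

theorem pv_toList_side (s : String) :
    (PySem.Str.replace (PySem.Str.replace (PySem.Str.replace
      (PySem.Str.replace s " " "") "-" "") "," "") "." "").toList
    = pvFilterKeep s := by
  simp only [PySem.Str.toList_replace]
  exact pv_four_replaces s.toList

-- ===== VERDICT (by name: the statement is the Claim_ definition above) =====
theorem stringComparison_spec : Claim_equal_stringComparison := by
  intro stringA stringB _
  unfold Spec_stringComparison stringComparison stringComparison_alt
  simp only [List.foldl]
  have hA := pv_toList_side stringA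
  have hB := pv_toList_side stringB
  by_cases h :
      PySem.Chars.lower (pvFilterKeep stringA) = PySem.Chars.lower (pvFilterKeep stringB)
  · have : PySem.Str.lower (PySem.Str.replace (PySem.Str.replace (PySem.Str.replace
        (PySem.Str.replace stringA " " "") "-" "") "," "") "." "")
        = PySem.Str.lower (PySem.Str.replace (PySem.Str.replace (PySem.Str.replace
        (PySem.Str.replace stringB " " "") "-" "") "," "") "." "") := by
      apply String.ext
      simp only [PySem.Str.toList_lower]
      rw [hA, hB]
      exact h
    simp [this, h]
  · have : PySem.Str.lower (PySem.Str.replace (PySem.Str.replace (PySem.Str.replace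
        (PySem.Str.replace stringA " " "") "-" "") "," "") "." "")
        ≠ PySem.Str.lower (PySem.Str.replace (PySem.Str.replace (PySem.Str.replace
        (PySem.Str.replace stringB " " "") "-" "") "," "") "." "") := by
      intro he
      apply h
      have := congrArg String.toList he
      simpa [PySem.Str.toList_lower, hA, hB] using this
    simp [this, h]
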